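-- pv_equiv track=rewrite | github.com/varunu28/A-Kata-A-Day | Python/Special Multiples.py | count_specMult
-- ===== SOURCE A (Python) =====
-- def count_specMult(a , max_val):
--     count=0
--     num_list=list(range(1,max_val+1))
--     p_list = prime_list(a)
--     i=0
--     while i<len(num_list):
--         n=0
--         c=1
--         while n<a:
--             if(num_list[i]%p_list[n]!=0):
--                 c=0
--                 break
--             n+=1
--         if(c==1):
--             num_list[i]=0
--         i+=1
--     count = num_list.count(0)
--
--     return count
--
-- def prime_list(a):
--     p_list = []
--     i=2
--     n=0
--     while n<a:
--         if(isPrime(i)):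
--             p_list.append(i)
--             n+=1
--         i+=1
--     return p_list
--
-- def isPrime(i):
--     if(i==2):
--         return True
--     if(i%2==0):
--         return False
--     j=2
--     while(j<=i/2):
--         if(i%j==0):
--             return False
--         j+=1
--     return True
-- ===== SOURCE B (Python) =====
-- def count_specMult(a, max_val):
--     # Numbers in 1..max_val divisible by all of the first a primes are exactly
--     # the multiples of their product, so the count is max_val // product.
--     if max_val <= 0:
--         return 0
--     product = 1
--     need = a
--     candidate = 2
--     while need > 0:
--         if product > max_val:
--             return 0
--         if _is_prime(candidate):
--             product *= candidate
--             need -= 1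
--         candidate += 1
--     return max_val // product
--
--
-- def _is_prime(n):
--     if n < 2:
--         return False
--     d = 2
--     while d * d <= n:
--         if n % d == 0:
--             return False
--         d += 1
--     return True
-- ===== Notes on version B (the rewrite author's own statement) =====
-- stated objective: faster
-- what changed: Instead of building the list 1..max_val and testing each number against every prime, B multiplies the first a primes (stopping as soon as the product exceeds max_val) and returns max_val // product.
import Mathlib
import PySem

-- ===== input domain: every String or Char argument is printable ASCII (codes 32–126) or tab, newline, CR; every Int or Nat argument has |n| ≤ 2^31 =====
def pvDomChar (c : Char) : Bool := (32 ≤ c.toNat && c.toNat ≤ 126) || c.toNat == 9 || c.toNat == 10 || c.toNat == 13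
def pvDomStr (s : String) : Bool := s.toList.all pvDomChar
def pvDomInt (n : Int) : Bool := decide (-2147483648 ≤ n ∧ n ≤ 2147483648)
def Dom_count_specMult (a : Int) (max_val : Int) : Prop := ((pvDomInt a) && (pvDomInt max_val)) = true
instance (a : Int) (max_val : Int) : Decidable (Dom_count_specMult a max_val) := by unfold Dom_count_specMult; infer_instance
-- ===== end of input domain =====

-- B replaces A's scan of 1..max_val against every prime by one floor division:
-- it multiplies the first a primes (stopping once the product exceeds max_val)
-- and returns max_val // product.
--
-- Both ports write their while-loops as structural recursion on a fuel argument;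
-- each fuel value is an upper bound on the number of iterations the Python loop
-- performs, so the guard of the loop — not the fuel — always ends the recursion.
-- For the two prime-hunting loops the bound is the largest prime the loop will
-- reach, computed by pvPrimeFuel below (a totality device only: the loops
-- themselves still scan candidates exactly as the Python does).
theorem pvExPrime (i : Int) : ∃ p : Nat, i ≤ (p : Int) ∧ p.Prime := by
  obtain ⟨p, hp, hpp⟩ := Nat.exists_infinite_primes i.toNat
  exact ⟨p, le_trans (Int.self_le_toNat i) (by exact_mod_cast hp), hpp⟩

def pvNextPrime (i : Int) : Int := (Nat.find (pvExPrime i) : Int)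

def pvFuelPrimes : Nat → Int → List Int
  | 0, _ => []
  | k + 1, i => pvNextPrime i :: pvFuelPrimes k (pvNextPrime i + 1)

def pvPrimeFuel (a : Int) : Nat := ((pvFuelPrimes a.toNat 2).getLastD 1 - 1).toNat

-- ===== PORT A =====
-- Python: while(j <= i/2): i/2 is float true division; for |i| ≤ 2^31 and integer j
-- the test j <= i/2 is exactly 2*j ≤ i.  Fuel bounds the iterations of the j-loop.
def isPrimeGo (i : Int) : Nat → Int → Bool
  | 0, _ => true
  | t + 1, j =>
    if 2 * j ≤ i then
      if PySem.Int.mod i j = 0 then false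
      else isPrimeGo i t (j + 1)
    else true

def isPrime (i : Int) : Bool :=
  if i = 2 then true
  else if PySem.Int.mod i 2 = 0 then false
  else isPrimeGo i (i + 1 - 2 * 2).toNat 2

def primeListGo (a : Int) : Nat → Int → Int → List Int → List Int
  | 0, _, _, p_list => p_list
  | t + 1, i, n, p_list =>
    if n < a then
      if isPrime i then primeListGo a t (i + 1) (n + 1) (p_list ++ [i])
      else primeListGo a t (i + 1) n p_list
    else p_list

def prime_list (a : Int) : List Int := primeListGo a (pvPrimeFuel a) 2 0 []

def innerGo (a : Int) (p_list : List Int) (x : Int) : Nat → Int → Int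
  | 0, _ => 1
  | t + 1, n =>
    if n < a then
      match PySem.List.pyGet? p_list n with
      | none => 1  -- unreachable in A: there n < a = len(p_list), the index is in range
      | some p =>
        if ¬ (PySem.Int.mod x p = 0) then 0
        else innerGo a p_list x t (n + 1)
    else 1

-- the mutation 'num_list[i] = 0' guarded by 'if c == 1'
def pvSetIf (num_list : List Int) (i : Int) (c : Int) : List Int :=
  if c = 1 then num_list.set i.toNat 0 else num_list

def outerGo (a : Int) (p_list : List Int) : Nat → List Int → Int → List Int
  | 0, num_list, _ => num_list
  | t + 1, num_list, i =>
    if i < (num_list.length : Int) then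
      let c : Int :=
        match PySem.List.pyGet? num_list i with
        | none => 1  -- unreachable in A: 0 ≤ i < len(num_list)
        | some x => innerGo a p_list x a.toNat 0
      outerGo a p_list t (pvSetIf num_list i c) (i + 1)
    else num_list

def count_specMult (a : Int) (max_val : Int) : Int :=
  let num_list := PySem.List.pyRange 1 (max_val + 1)
  let p_list := prime_list a
  (PySem.List.count (outerGo a p_list num_list.length num_list 0) 0 : Int)

-- ===== PORT B =====
def altGo (n : Int) : Nat → Int → Bool
  | 0, _ => true
  | t + 1, d =>
    if d * d ≤ n then
      if PySem.Int.mod n d = 0 then false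
      else altGo n t (d + 1)
    else true

def altIsPrime (n : Int) : Bool :=
  if n < 2 then false else altGo n (n + 1 - 2).toNat 2

def altLoopGo (max_val : Int) : Nat → Int → Int → Int → Int
  | 0, product, _, _ => PySem.Int.floordiv max_val product
  | t + 1, product, need, candidate =>
    if need > 0 then
      if product > max_val then 0
      else if altIsPrime candidate then
        altLoopGo max_val t (product * candidate) (need - 1) (candidate + 1)
      else altLoopGo max_val t product need (candidate + 1)
    else PySem.Int.floordiv max_val product

def count_specMult_alt (a : Int) (max_val : Int) : Int :=
  if max_val ≤ 0 then 0 else altLoopGo max_val (pvPrimeFuel a) 1 a 2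

-- ===== PRECONDITION & SPEC =====
def Spec_count_specMult (a : Int) (max_val : Int) (out : Int) : Prop := out = count_specMult_alt a max_val
instance (a : Int) (max_val : Int) (out : Int) : Decidable (Spec_count_specMult a max_val out) := by unfold Spec_count_specMult; infer_instance

-- ===== CLAIM (what is proved, stated in full; the proofs are below) =====
def Claim_equal_count_specMult : Prop := ∀ (a : Int) (max_val : Int), Dom_count_specMult a max_val → Spec_count_specMult a max_val (count_specMult a max_val)

-- ===== LEMMAS AND PROOFS =====

-- B's trial division accepts every genuine prime (given enough fuel)
theorem altGo_eq_true {n : Int} : ∀ (t : Nat) (d : Int),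
    (∀ k : Int, d ≤ k → k * k ≤ n → PySem.Int.mod n k ≠ 0) →
    altGo n t d = true := by
  intro t
  induction t with
  | zero => intro d h; rfl
  | succ t ih =>
    intro d h
    show (if d * d ≤ n then _ else _) = true
    split
    · rename_i hle
      rw [if_neg (h d le_rfl hle)]
      exact ih (d + 1) (fun k hk h2 => h k (le_trans (by omega) hk) h2)
    · rfl

-- B's trial division rejects a number with a divisor k, k*k ≤ n
theorem altGo_eq_false {n k : Int} (hk : 2 ≤ k) (hkk : k * k ≤ n)
    (hmod : PySem.Int.mod n k = 0) :
    ∀ (t : Nat) (d : Int), 2 ≤ d → d ≤ k → k - d < (t : Int) → altGo n t d = false := by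
  intro t
  induction t with
  | zero =>
    intro d h2 hdk ht
    exact absurd ht (by push_cast; omega)
  | succ t ih =>
    intro d h2 hdk ht
    have hdd : d * d ≤ n := le_trans (mul_le_mul hdk hdk (by omega) (by omega)) hkk
    show (if d * d ≤ n then _ else _) = false
    rw [if_pos hdd]
    by_cases hmd : PySem.Int.mod n d = 0
    · rw [if_pos hmd]
    · rw [if_neg hmd]
      have hne : d ≠ k := fun he => hmd (he ▸ hmod)
      exact ih (d + 1) (by omega) (by omega) (by push_cast at ht ⊢; omega)

theorem altIsPrime_true_of_prime {p : Nat} (hp : p.Prime) : altIsPrime (p : Int) = true := by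
  have hp2 : 2 ≤ p := hp.two_le
  rw [altIsPrime, if_neg (by exact_mod_cast not_lt.mpr (by exact_mod_cast hp2))]
  apply altGo_eq_true
  intro k hk hk2 hmod
  rw [PySem.Int.mod_eq_zero_iff_dvd] at hmod
  have hkpos : (0 : Int) ≤ k := by omega
  obtain ⟨m, rfl⟩ := Int.eq_ofNat_of_zero_le hkpos
  have hmd : m ∣ p := by exact_mod_cast hmod
  have : (m : Int) * m ≤ p := hk2
  rcases (Nat.Prime.eq_one_or_self_of_dvd hp m hmd) with h | h
  · omega
  · subst h; nlinarith [hk]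

-- exactness of B's trial division
theorem altIsPrime_iff (n : Int) : altIsPrime n = true ↔ 2 ≤ n ∧ n.toNat.Prime := by
  constructor
  · intro h
    rw [altIsPrime] at h
    split at h
    · exact absurd h (by simp)
    · rename_i h2
      rw [not_lt] at h2
      refine ⟨h2, ?_⟩
      by_contra hnp
      set m := n.toNat with hm
      have hnm : n = (m : Int) := by omega
      have hm2 : 2 ≤ m := by omega
      have hqp : m.minFac.Prime := Nat.minFac_prime (by omega)
      have hq2 : 2 ≤ m.minFac := hqp.two_le
      have hqq : m.minFac * m.minFac ≤ m := by
        have := Nat.minFac_sq_le_self (by omega) hnp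
        nlinarith [this, sq m.minFac]
      have hmod : PySem.Int.mod n (m.minFac : Int) = 0 := by
        rw [PySem.Int.mod_eq_zero_iff_dvd, hnm]
        exact_mod_cast Nat.minFac_dvd m
      have hkn : (m.minFac : Int) ≤ n := by
        have h1 : (m.minFac : Int) * m.minFac ≤ n := by rw [hnm]; exact_mod_cast hqq
        nlinarith [h1, (by exact_mod_cast hq2 : (2:ℤ) ≤ (m.minFac : Int))]
      have := altGo_eq_false (n := n) (k := (m.minFac : Int))
        (by exact_mod_cast hq2) (by rw [hnm]; exact_mod_cast hqq) hmod
        (n + 1 - 2).toNat 2 le_rfl (by exact_mod_cast hq2)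
        (by have := Int.self_le_toNat (n + 1 - 2); omega)
      rw [this] at h
      exact absurd h (by simp)
  · rintro ⟨h2, hp⟩
    have : n = (n.toNat : Int) := by omega
    rw [this]
    exact altIsPrime_true_of_prime hp

-- A's trial division accepts every genuine prime (given enough fuel)
theorem isPrimeGo_eq_true {i : Int} : ∀ (t : Nat) (j : Int),
    (∀ k : Int, j ≤ k → 2 * k ≤ i → PySem.Int.mod i k ≠ 0) →
    isPrimeGo i t j = true := by
  intro t
  induction t with
  | zero => intro j h; rfl
  | succ t ih =>
    intro j h
    show (if 2 * j ≤ i then _ else _) = true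
    split
    · rename_i hle
      rw [if_neg (h j le_rfl hle)]
      exact ih (j + 1) (fun k hk h2 => h k (le_trans (by omega) hk) h2)
    · rfl

-- A's trial division rejects a number with a divisor k, 2*k ≤ i
theorem isPrimeGo_eq_false {i k : Int} (hk : 2 ≤ k) (hkk : 2 * k ≤ i)
    (hmod : PySem.Int.mod i k = 0) :
    ∀ (t : Nat) (j : Int), 2 ≤ j → j ≤ k → k - j < (t : Int) → isPrimeGo i t j = false := by
  intro t
  induction t with
  | zero =>
    intro j h2 hjk ht
    exact absurd ht (by push_cast; omega)
  | succ t ih =>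
    intro j h2 hjk ht
    show (if 2 * j ≤ i then _ else _) = false
    rw [if_pos (by omega)]
    by_cases hmd : PySem.Int.mod i j = 0
    · rw [if_pos hmd]
    · rw [if_neg hmd]
      have hne : j ≠ k := fun he => hmd (he ▸ hmod)
      exact ih (j + 1) (by omega) (by omega) (by push_cast at ht ⊢; omega)

theorem isPrime_true_of_prime {p : Nat} (hp : p.Prime) : isPrime (p : Int) = true := by
  by_cases h2 : (p : Int) = 2
  · rw [isPrime, if_pos h2]
  · have hp2 : 2 ≤ p := hp.two_le
    have hodd : PySem.Int.mod (p : Int) 2 ≠ 0 := by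
      rw [Ne, PySem.Int.mod_eq_zero_iff_dvd]
      intro hdvd
      have : (2 : Nat) ∣ p := by exact_mod_cast hdvd
      rcases (Nat.Prime.eq_one_or_self_of_dvd hp 2 this) with h | h <;> omega
    rw [isPrime, if_neg h2, if_neg hodd]
    apply isPrimeGo_eq_true
    intro k hk hk2 hmod
    rw [PySem.Int.mod_eq_zero_iff_dvd] at hmod
    have hkpos : (0 : Int) ≤ k := by omega
    obtain ⟨m, rfl⟩ := Int.eq_ofNat_of_zero_le hkpos
    have hmd : m ∣ p := by exact_mod_cast hmod
    rcases (Nat.Prime.eq_one_or_self_of_dvd hp m hmd) with h | h <;> omega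

-- exactness of A's trial division on candidates ≥ 2
theorem isPrime_iff {i : Int} (h : 2 ≤ i) : isPrime i = true ↔ i.toNat.Prime := by
  constructor
  · intro hh
    by_contra hnp
    set m := i.toNat with hm
    have hnm : i = (m : Int) := by omega
    have hm2 : 2 ≤ m := by omega
    have hne2 : i ≠ 2 := by
      intro he; exact hnp (by rw [hm, he]; decide)
    rw [isPrime, if_neg hne2] at hh
    split at hh
    · exact absurd hh (by simp)
    · rename_i hodd
      have hqp : m.minFac.Prime := Nat.minFac_prime (by omega)
      have hq2 : 2 ≤ m.minFac := hqp.two_le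
      have hq3 : 3 ≤ m.minFac := by
        rcases Nat.lt_or_ge m.minFac 3 with hlt | hge
        · have : m.minFac = 2 := by omega
          exfalso
          apply hodd
          rw [PySem.Int.mod_eq_zero_iff_dvd, hnm]
          exact_mod_cast this ▸ Nat.minFac_dvd m
        · exact hge
      have hqq : m.minFac * m.minFac ≤ m := by
        have := Nat.minFac_sq_le_self (by omega) hnp
        nlinarith [this, sq m.minFac]
      have hmod : PySem.Int.mod i (m.minFac : Int) = 0 := by
        rw [PySem.Int.mod_eq_zero_iff_dvd, hnm]
        exact_mod_cast Nat.minFac_dvd m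
      have h2q : 2 * (m.minFac : Int) ≤ i := by
        have : 2 * m.minFac ≤ m.minFac * m.minFac := by nlinarith
        have : 2 * m.minFac ≤ m := le_trans this hqq
        omega
      have := isPrimeGo_eq_false (i := i) (k := (m.minFac : Int))
        (by exact_mod_cast hq2) h2q hmod
        (i + 1 - 2 * 2).toNat 2 le_rfl (by exact_mod_cast hq2)
        (by have := Int.self_le_toNat (i + 1 - 2 * 2); omega)
      rw [this] at hh
      exact absurd hh (by simp)
  · intro hp
    have : i = (i.toNat : Int) := by omega
    rw [this]
    exact isPrime_true_of_prime hp

-- A's and B's primality tests agree on candidates ≥ 2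
theorem isPrime_eq_alt {i : Int} (h : 2 ≤ i) : isPrime i = altIsPrime i := by
  rw [Bool.eq_iff_iff, isPrime_iff h, altIsPrime_iff]
  exact ⟨fun hp => ⟨h, hp⟩, fun hp => hp.2⟩

-- termination machinery for the proof-side helper listPrimes: the distance to
-- the next prime, finite by pvExPrime
def pvGap (i : Int) : Nat := (pvNextPrime i - i).toNat

theorem pvNextPrime_succ {i : Int} (h : ∀ p : Nat, (p : Int) = i → ¬ p.Prime) :
    pvNextPrime (i + 1) = pvNextPrime i := by
  have h1 := Nat.find_spec (pvExPrime i)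
  set N := Nat.find (pvExPrime i) with hN
  have hne : (N : Int) ≠ i := fun he => h N he h1.2
  have hi1 : i + 1 ≤ (N : Int) := by omega
  have heq : Nat.find (pvExPrime (i + 1)) = N := by
    apply le_antisymm
    · exact Nat.find_min' _ ⟨hi1, h1.2⟩
    · have h2 := Nat.find_spec (pvExPrime (i + 1))
      exact Nat.find_min' _ ⟨by omega, h2.2⟩
  unfold pvNextPrime
  rw [heq]

theorem pvGap_lt {i : Int} (h : ∀ p : Nat, (p : Int) = i → ¬ p.Prime) :
    pvGap (i + 1) < pvGap i := by
  have h1 := Nat.find_spec (pvExPrime i)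
  have hne : ((Nat.find (pvExPrime i) : Nat) : Int) ≠ i := fun he => h _ he h1.2
  have h2 : i ≤ ((Nat.find (pvExPrime i) : Nat) : Int) := h1.1
  unfold pvGap
  rw [pvNextPrime_succ h]
  unfold pvNextPrime
  omega

theorem pvGapB_lt {i : Int} (h2 : 2 ≤ i) (h : altIsPrime i ≠ true) : pvGap (i + 1) < pvGap i :=
  pvGap_lt (fun p hpe hpp => h (by
    have : i.toNat.Prime := by
      have : p = i.toNat := by omega
      exact this ▸ hpp
    exact (altIsPrime_iff i).mpr ⟨h2, this⟩))

theorem pvDecPos {need : Int} (h : need > 0) : (need - 1).toNat < need.toNat := by omega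

-- the first `need` numbers accepted by trial division, scanning upward from i
-- (proof-side specification of both prime hunts; i ≥ 2 wherever it is used)
def listPrimes (need : Int) (i : Int) : List Int :=
  if h2 : 2 ≤ i then
    if need > 0 then
      if altIsPrime i then i :: listPrimes (need - 1) (i + 1)
      else listPrimes need (i + 1)
    else []
  else []
termination_by (need.toNat, pvGap i)
decreasing_by
  · exact Prod.Lex.left _ _ (pvDecPos (by assumption))
  · exact Prod.Lex.right _ (pvGapB_lt h2 (by assumption))

theorem mem_listPrimes : ∀ (need i p : Int), p ∈ listPrimes need i →
    i ≤ p ∧ altIsPrime p = true := by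
  intro need i p h
  induction need, i using listPrimes.induct with
  | case1 need i h2 hpos hp ih =>
    rw [listPrimes, dif_pos h2, if_pos hpos, if_pos hp] at h
    rcases List.mem_cons.mp h with rfl | hm
    · exact ⟨le_rfl, hp⟩
    · exact ⟨by have := (ih hm).1; omega, (ih hm).2⟩
  | case2 need i h2 hpos hp ih =>
    rw [listPrimes, dif_pos h2, if_pos hpos, if_neg (by simp [hp])] at h
    exact ⟨by have := (ih h).1; omega, (ih h).2⟩
  | case3 need i h2 hpos =>
    rw [listPrimes, dif_pos h2, if_neg hpos] at h
    exact absurd h List.not_mem_nil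
  | case4 need i h2 =>
    rw [listPrimes, dif_neg h2] at h
    exact absurd h List.not_mem_nil

theorem length_listPrimes : ∀ (need i : Int), 2 ≤ i →
    (listPrimes need i).length = need.toNat := by
  intro need i
  induction need, i using listPrimes.induct with
  | case1 need i h2 hpos hp ih =>
    intro _
    rw [listPrimes, dif_pos h2, if_pos hpos, if_pos hp, List.length_cons, ih (by omega)]
    omega
  | case2 need i h2 hpos hp ih =>
    intro _
    rw [listPrimes, dif_pos h2, if_pos hpos, if_neg (by simp [hp]), ih (by omega)]
  | case3 need i h2 hpos =>
    intro _
    rw [listPrimes, dif_pos h2, if_neg hpos]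
    simp; omega
  | case4 need i h2 =>
    intro h; exact absurd h h2

theorem listPrimes_prod_pos : ∀ (need i : Int), 1 ≤ (listPrimes need i).prod := by
  intro need i
  induction need, i using listPrimes.induct with
  | case1 need i h2 hpos hp ih =>
    rw [listPrimes, dif_pos h2, if_pos hpos, if_pos hp, List.prod_cons]
    nlinarith [ih]
  | case2 need i h2 hpos hp ih =>
    rw [listPrimes, dif_pos h2, if_pos hpos, if_neg (by simp [hp])]
    exact ih
  | case3 need i h2 hpos =>
    rw [listPrimes, dif_pos h2, if_neg hpos, List.prod_nil]
  | case4 need i h2 =>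
    rw [listPrimes, dif_neg h2, List.prod_nil]

theorem listPrimes_pairwise : ∀ (need i : Int), (listPrimes need i).Pairwise (· < ·) := by
  intro need i
  induction need, i using listPrimes.induct with
  | case1 need i h2 hpos hp ih =>
    rw [listPrimes, dif_pos h2, if_pos hpos, if_pos hp, List.pairwise_cons]
    exact ⟨fun p hm => by have := (mem_listPrimes _ _ p hm).1; omega, ih⟩
  | case2 need i h2 hpos hp ih =>
    rw [listPrimes, dif_pos h2, if_pos hpos, if_neg (by simp [hp])]
    exact ih
  | case3 need i h2 hpos =>
    rw [listPrimes, dif_pos h2, if_neg hpos]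
    exact List.Pairwise.nil
  | case4 need i h2 =>
    rw [listPrimes, dif_neg h2]
    exact List.Pairwise.nil

-- listPrimes agrees with the Nat.find-based jump list used as fuel
theorem pvNextPrime_eq_self {i : Int} (h2 : 2 ≤ i) (hp : i.toNat.Prime) :
    pvNextPrime i = i := by
  have hfind : Nat.find (pvExPrime i) = i.toNat := by
    apply le_antisymm
    · exact Nat.find_min' _ ⟨by omega, hp⟩
    · have h1 := Nat.find_spec (pvExPrime i)
      omega
  unfold pvNextPrime
  rw [hfind]; omega

theorem pvFuelPrimes_shift {i : Int} (h : pvNextPrime (i + 1) = pvNextPrime i) :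
    ∀ k : Nat, pvFuelPrimes k i = pvFuelPrimes k (i + 1) := by
  intro k
  cases k with
  | zero => rfl
  | succ k => show pvNextPrime i :: _ = pvNextPrime (i+1) :: _; rw [h]

theorem listPrimes_eq_fuel : ∀ (need i : Int), 2 ≤ i →
    listPrimes need i = pvFuelPrimes need.toNat i := by
  intro need i
  induction need, i using listPrimes.induct with
  | case1 need i h2 hpos hp ih =>
    intro _
    have hip : i.toNat.Prime := ((altIsPrime_iff i).mp hp).2
    have hk : need.toNat = (need - 1).toNat + 1 := by omega
    rw [listPrimes, dif_pos h2, if_pos hpos, if_pos hp, ih (by omega), hk]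
    show _ = pvNextPrime i :: pvFuelPrimes (need - 1).toNat (pvNextPrime i + 1)
    rw [pvNextPrime_eq_self h2 hip]
  | case2 need i h2 hpos hp ih =>
    intro _
    have hnp : ∀ p : Nat, (p : Int) = i → ¬ p.Prime := by
      intro p hpe hpp
      have : i.toNat.Prime := by
        have : p = i.toNat := by omega
        exact this ▸ hpp
      exact (by simp [hp] : altIsPrime i ≠ true) ((altIsPrime_iff i).mpr ⟨h2, this⟩)
    rw [listPrimes, dif_pos h2, if_pos hpos, if_neg (by simp [hp]), ih (by omega),
        pvFuelPrimes_shift (pvNextPrime_succ hnp) need.toNat]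
  | case3 need i h2 hpos =>
    intro _
    have hk : need.toNat = 0 := by omega
    rw [listPrimes, dif_pos h2, if_neg hpos, hk]
    rfl
  | case4 need i h2 =>
    intro h; exact absurd h h2

theorem getLastD_irrel {L : List Int} (h : L ≠ []) (d1 d2 : Int) :
    L.getLastD d1 = L.getLastD d2 := by
  rw [List.getLastD_eq_getLast?, List.getLastD_eq_getLast?, List.getLast?_eq_getLast h]
  rfl

-- fuel bound for a prime hunt starting at state (need, i):
-- the largest prime it will reach, minus the candidate before i
theorem listPrimes_getLastD_ge : ∀ (need i : Int), 2 ≤ i → need > 0 →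
    i ≤ (listPrimes need i).getLastD (i - 1) := by
  intro need i h2 hpos
  have hlen : (listPrimes need i).length = need.toNat := length_listPrimes need i h2
  have hne : listPrimes need i ≠ [] := by
    intro he; rw [he] at hlen; simp at hlen; omega
  have hmem := List.getLast_mem hne
  have := (mem_listPrimes need i _ hmem).1
  rw [List.getLastD_eq_getLast?, List.getLast?_eq_getLast hne]
  exact this

-- A's prime_list loop reaches the same list, given enough fuel
theorem primeListGo_eq (a : Int) : ∀ (t : Nat) (i n : Int) (acc : List Int), 2 ≤ i →
    (listPrimes (a - n) i).getLastD (i - 1) - (i - 1) ≤ (t : Int) →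
    primeListGo a t i n acc = acc ++ listPrimes (a - n) i := by
  intro t
  induction t with
  | zero =>
    intro i n acc h2 hfuel
    have hz : ¬ (a - n > 0) := by
      intro hpos
      have := listPrimes_getLastD_ge (a - n) i h2 hpos
      push_cast at hfuel
      omega
    rw [listPrimes, dif_pos h2, if_neg hz, List.append_nil]
    rfl
  | succ t ih =>
    intro i n acc h2 hfuel
    show (if n < a then _ else _) = _
    by_cases hlt : n < a
    · rw [if_pos hlt]
      have hpos : a - n > 0 := by omega
      by_cases hp : isPrime i = true
      · have halt : altIsPrime i = true := (isPrime_eq_alt h2) ▸ hp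
        have hR : listPrimes (a - n) i = i :: listPrimes (a - n - 1) (i + 1) := by
          rw [listPrimes, dif_pos h2, if_pos hpos, if_pos halt]
        rw [if_pos hp]
        have h3 : a - (n + 1) = a - n - 1 := by ring
        have hfuel' : (listPrimes (a - (n+1)) (i+1)).getLastD ((i+1) - 1) - ((i+1) - 1) ≤ (t : Int) := by
          have hcons : (listPrimes (a - n) i).getLastD (i - 1) =
              (listPrimes (a - n - 1) (i + 1)).getLastD i := by
            rw [hR, List.getLastD_cons]
          push_cast at hfuel ⊢
          rw [hcons] at hfuel
          rw [h3]
          have : (i + 1) - 1 = i := by ring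
          rw [this]
          omega
        rw [ih (i + 1) (n + 1) (acc ++ [i]) (by omega) hfuel', hR, h3]
        simp
      · have halt : ¬ altIsPrime i = true := (isPrime_eq_alt h2) ▸ hp
        have hR : listPrimes (a - n) i = listPrimes (a - n) (i + 1) := by
          rw [listPrimes, dif_pos h2, if_pos hpos, if_neg halt]
        rw [if_neg hp]
        have hne : listPrimes (a - n) (i + 1) ≠ [] := by
          intro he
          have := length_listPrimes (a - n) (i + 1) (by omega)
          rw [he] at this; simp at this; omega
        have hfuel' : (listPrimes (a - n) (i+1)).getLastD ((i+1) - 1) - ((i+1) - 1) ≤ (t : Int) := by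
          have hir : (listPrimes (a - n) (i + 1)).getLastD ((i + 1) - 1) =
              (listPrimes (a - n) (i + 1)).getLastD (i - 1) := getLastD_irrel hne _ _
          rw [hir]
          rw [hR] at hfuel
          push_cast at hfuel ⊢
          omega
        rw [ih (i + 1) n acc (by omega) hfuel', hR]
    · rw [if_neg hlt, listPrimes, dif_pos h2, if_neg (by omega), List.append_nil]

-- B's loop computes max_val // (product * remaining primes), given enough fuel
theorem altLoopGo_eq (max_val : Int) (hm : 1 ≤ max_val) :
    ∀ (t : Nat) (product need i : Int), 1 ≤ product → 2 ≤ i →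
    (listPrimes need i).getLastD (i - 1) - (i - 1) ≤ (t : Int) →
    altLoopGo max_val t product need i =
      PySem.Int.floordiv max_val (product * (listPrimes need i).prod) := by
  intro t
  induction t with
  | zero =>
    intro product need i hp1 h2 hfuel
    have hz : ¬ (need > 0) := by
      intro hpos
      have := listPrimes_getLastD_ge need i h2 hpos
      push_cast at hfuel
      omega
    rw [listPrimes, dif_pos h2, if_neg hz, List.prod_nil, mul_one]
    rfl
  | succ t ih =>
    intro product need i hp1 h2 hfuel
    show (if need > 0 then _ else _) = _
    by_cases hpos : need > 0
    · rw [if_pos hpos]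
      by_cases hgt : product > max_val
      · rw [if_pos hgt]
        have hprod := listPrimes_prod_pos need i
        have hbpos : 0 < product * (listPrimes need i).prod := by nlinarith
        exact ((PySem.Int.floordiv_eq_iff_of_pos hbpos).mpr ⟨by omega, by nlinarith⟩).symm
      · rw [if_neg hgt]
        by_cases hp : altIsPrime i = true
        · have hR : listPrimes need i = i :: listPrimes (need - 1) (i + 1) := by
            rw [listPrimes, dif_pos h2, if_pos hpos, if_pos hp]
          rw [if_pos hp]
          have hfuel' : (listPrimes (need-1) (i+1)).getLastD ((i+1) - 1) - ((i+1) - 1) ≤ (t : Int) := by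
            have hcons : (listPrimes need i).getLastD (i - 1) =
                (listPrimes (need - 1) (i + 1)).getLastD i := by
              rw [hR, List.getLastD_cons]
            push_cast at hfuel ⊢
            rw [hcons] at hfuel
            have : (i + 1) - 1 = i := by ring
            rw [this]
            omega
          rw [ih (product * i) (need - 1) (i + 1)
              (by nlinarith [((altIsPrime_iff i).mp hp).1]) (by omega) hfuel', hR,
              List.prod_cons]
          ring_nf
        · have hR : listPrimes need i = listPrimes need (i + 1) := by
            rw [listPrimes, dif_pos h2, if_pos hpos, if_neg hp]
          rw [if_neg hp]
          have hne : listPrimes need (i + 1) ≠ [] := by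
            intro he
            have := length_listPrimes need (i + 1) (by omega)
            rw [he] at this; simp at this; omega
          have hfuel' : (listPrimes need (i+1)).getLastD ((i+1) - 1) - ((i+1) - 1) ≤ (t : Int) := by
            have hir : (listPrimes need (i + 1)).getLastD ((i + 1) - 1) =
                (listPrimes need (i + 1)).getLastD (i - 1) := getLastD_irrel hne _ _
            rw [hir]
            rw [hR] at hfuel
            push_cast at hfuel ⊢
            omega
          rw [ih product need (i + 1) hp1 (by omega) hfuel', hR]
    · rw [if_neg hpos, listPrimes, dif_pos h2, if_neg hpos, List.prod_nil, mul_one]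

theorem innerGo_eq (P : List Int) (x : Int) : ∀ (t n : Nat), P.length - n ≤ t →
    innerGo (P.length : Int) P x t (n : Int) =
      if (P.drop n).all (fun p => decide (PySem.Int.mod x p = 0)) then 1 else 0 := by
  intro t
  induction t with
  | zero =>
    intro n ht
    have hn : P.length ≤ n := by omega
    rw [List.drop_eq_nil_of_le hn]
    simp [innerGo]
  | succ t ih =>
    intro n ht
    by_cases hn : n < P.length
    · show (if (n : Int) < (P.length : Int) then _ else _) = _
      rw [if_pos (by exact_mod_cast hn), PySem.List.pyGet?_natCast,
          List.getElem?_eq_getElem hn]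
      simp only []
      rw [List.drop_eq_getElem_cons hn, List.all_cons]
      by_cases hmod : PySem.Int.mod x P[n] = 0
      · rw [if_neg (by simp [hmod])]
        have hcast : ((n : Int) + 1) = ((n + 1 : Nat) : Int) := by push_cast; ring
        rw [hcast, ih (n + 1) (by omega)]
        simp [hmod]
      · rw [if_pos (by simp [hmod])]
        simp [hmod]
    · have hn' : P.length ≤ n := by omega
      show (if (n : Int) < (P.length : Int) then _ else _) = _
      rw [if_neg (by exact_mod_cast not_lt.mpr hn'), List.drop_eq_nil_of_le hn']
      simp

theorem outerGo_eq (a : Int) (P : List Int) :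
    ∀ (t : Nat) (L : List Int) (i : Nat), L.length - i ≤ t →
    outerGo a P t L (i : Int) =
      L.take i ++ (L.drop i).map (fun x => if innerGo a P x a.toNat 0 = 1 then 0 else x) := by
  intro t
  induction t with
  | zero =>
    intro L i ht
    have hn : L.length ≤ i := by omega
    rw [List.drop_eq_nil_of_le hn, List.take_of_length_le hn]
    simp [outerGo]
  | succ t ih =>
    intro L i ht
    by_cases hn : i < L.length
    · show (if (i : Int) < (L.length : Int) then _ else _) = _
      rw [if_pos (by exact_mod_cast hn), PySem.List.pyGet?_natCast,
          List.getElem?_eq_getElem hn]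
      simp only []
      have hcast : ((i : Int) + 1) = ((i + 1 : Nat) : Int) := by push_cast; ring
      rw [hcast, ih (pvSetIf L (i : Int) (innerGo a P L[i] a.toNat 0)) (i + 1)
          (by unfold pvSetIf; split <;> simp <;> omega)]
      rw [List.drop_eq_getElem_cons hn, List.map_cons]
      by_cases hc : innerGo a P L[i] a.toNat 0 = 1
      · have hL' : pvSetIf L (i : Int) (innerGo a P L[i] a.toNat 0) = L.set i 0 := by
          rw [pvSetIf, if_pos hc, Int.toNat_natCast]
        rw [hL', if_pos hc]
        have htake : (L.set i 0).take (i + 1) = L.take i ++ [0] := by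
          rw [List.take_set, List.take_add_one, List.getElem?_eq_getElem hn, List.set_append]
          simp [List.length_take, Nat.min_eq_left (le_of_lt hn)]
        have hdrop : (L.set i 0).drop (i + 1) = L.drop (i + 1) := by
          rw [List.drop_set, if_pos (by omega)]
        rw [htake, hdrop]
        simp
      · have hL' : pvSetIf L (i : Int) (innerGo a P L[i] a.toNat 0) = L := by
          rw [pvSetIf, if_neg hc]
        have htake : L.take (i + 1) = L.take i ++ [L[i]] := by
          rw [List.take_add_one, List.getElem?_eq_getElem hn]; simp
        rw [hL', if_neg hc]
        simp only [List.map_drop]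
        rw [htake]
        simp only [List.append_assoc, List.singleton_append]
    · have hn' : L.length ≤ i := by omega
      show (if (i : Int) < (L.length : Int) then _ else _) = _
      rw [if_neg (by exact_mod_cast not_lt.mpr hn'), List.drop_eq_nil_of_le hn',
          List.take_of_length_le hn']
      simp

theorem dvd_prod_iff_forall (x : Int) : ∀ (Q : List Int),
    Q.Pairwise (· ≠ ·) → (∀ p ∈ Q, Prime p ∧ 0 < p) →
    ((∀ p ∈ Q, p ∣ x) ↔ Q.prod ∣ x) := by
  intro Q
  induction Q with
  | nil => simp
  | cons p Q ih =>
    intro hpw hpr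
    have hppr := (hpr p List.mem_cons_self).1
    have hQ := ih (List.pairwise_cons.mp hpw).2 (fun q hq => hpr q (List.mem_cons_of_mem _ hq))
    constructor
    · intro h
      rw [List.prod_cons]
      have hco : IsCoprime p Q.prod := by
        rw [hppr.irreducible.coprime_iff_not_dvd]
        intro hd
        obtain ⟨q, hqQ, hpq⟩ := (Prime.dvd_prod_iff hppr).mp hd
        have hqpr := (hpr q (List.mem_cons_of_mem _ hqQ)).1
        obtain ⟨c, hc⟩ := hpq
        rcases hqpr.irreducible.isUnit_or_isUnit hc with hu | hu
        · exact hppr.not_unit hu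
        · rcases Int.isUnit_iff.mp hu with h1 | h1
          · rw [h1, mul_one] at hc
            exact (List.pairwise_cons.mp hpw).1 q hqQ hc.symm
          · rw [h1, mul_neg_one] at hc
            have hq0 := (hpr q (List.mem_cons_of_mem _ hqQ)).2
            have hp0 := (hpr p List.mem_cons_self).2
            omega
      exact hco.mul_dvd (h p List.mem_cons_self)
        (hQ.mp fun q hq => h q (List.mem_cons_of_mem _ hq))
    · intro h q hq
      rw [List.prod_cons] at h
      rcases List.mem_cons.mp hq with rfl | hm
      · exact dvd_trans (dvd_mul_right _ _) h
      · exact (hQ.mpr (dvd_trans (dvd_mul_left _ _) h)) q hm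

theorem count_multiples (d : Int) (hd : 1 ≤ d) : ∀ (N : Nat),
    (List.count 0 ((PySem.List.pyRange 1 ((N : Int) + 1)).map
        (fun x => if d ∣ x then (0 : Int) else x)) : Int) =
      PySem.Int.floordiv (N : Int) d := by
  intro N
  induction N with
  | zero =>
    have hnil : PySem.List.pyRange 1 (((0 : Nat) : Int) + 1) = [] := by
      simp [PySem.List.pyRange]
    rw [hnil]
    have : PySem.Int.floordiv ((0 : Nat) : Int) d = 0 :=
      (PySem.Int.floordiv_eq_iff_of_pos (by omega)).mpr ⟨by simp, by simpa using (by omega : (0:ℤ) < d)⟩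
    rw [this]
    simp
  | succ N ihN =>
    have hcast : (((N + 1 : Nat)) : Int) + 1 = (((N : Int) + 1) + 1) := by push_cast; ring
    have hr : PySem.List.pyRange 1 (((N + 1 : Nat) : Int) + 1) =
        PySem.List.pyRange 1 ((N : Int) + 1) ++ [(N : Int) + 1] := by
      rw [hcast, PySem.List.pyRange_one_succ_right (by omega)]
    rw [hr, List.map_append, List.count_append]
    have hsing : (List.count 0 ((([(N : Int) + 1]).map
        (fun x => if d ∣ x then (0 : Int) else x))) : Int) =
        if d ∣ ((N : Int) + 1) then 1 else 0 := by
      by_cases hdvd : d ∣ ((N : Int) + 1)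
      · simp [hdvd]
      · have hne : ((N : Int) + 1) ≠ 0 := by omega
        simp [hdvd, hne]
    set m := d.toNat with hmdef
    have hdm : d = (m : Int) := by omega
    have hstep : PySem.Int.floordiv (((N + 1 : Nat)) : Int) d =
        PySem.Int.floordiv ((N : Nat) : Int) d + (if d ∣ ((N : Int) + 1) then 1 else 0) := by
      rw [hdm, PySem.Int.floordiv_natCast, PySem.Int.floordiv_natCast, Nat.succ_div]
      have hdv : (m ∣ N + 1) ↔ ((m : Int) ∣ ((N : Int) + 1)) := by
        constructor
        · intro h; exact_mod_cast Int.natCast_dvd_natCast.mpr h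
        · intro h; exact_mod_cast Int.natCast_dvd_natCast.mp (by exact_mod_cast h)
      by_cases hdvd : m ∣ N + 1
      · rw [if_pos hdvd, if_pos (hdv.mp hdvd)]; push_cast; ring
      · rw [if_neg hdvd, if_neg (fun hc => hdvd (hdv.mpr hc))]; push_cast; ring
    rw [hstep]
    push_cast
    rw [ihN, hsing]

-- ===== VERDICT (by name: the statement is the Claim_ definition above) =====
theorem count_specMult_spec : Claim_equal_count_specMult := by
  unfold Claim_equal_count_specMult
  intro a max_val _
  unfold Spec_count_specMult count_specMult count_specMult_alt
  have hfuelOK : (listPrimes a 2).getLastD 1 - 1 ≤ ((pvPrimeFuel a : Nat) : Int) := by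
    rw [listPrimes_eq_fuel a 2 (by omega)]
    unfold pvPrimeFuel
    have := Int.self_le_toNat ((pvFuelPrimes a.toNat 2).getLastD 1 - 1)
    omega
  have hPL : prime_list a = listPrimes a 2 := by
    rw [prime_list, primeListGo_eq a (pvPrimeFuel a) 2 0 [] (by omega)
        (by simpa using hfuelOK)]
    simp
  by_cases hm : max_val ≤ 0
  · rw [if_pos hm]
    have hnil : PySem.List.pyRange 1 (max_val + 1) = [] := by
      simp [PySem.List.pyRange]; omega
    show (PySem.List.count
        (outerGo a (prime_list a) (PySem.List.pyRange 1 (max_val + 1)).length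
          (PySem.List.pyRange 1 (max_val + 1)) 0) 0 : Int) = 0
    rw [hnil]
    simp [outerGo, PySem.List.count]
  · rw [if_neg hm]
    have hm1 : 1 ≤ max_val := by omega
    set Q := listPrimes a 2 with hQ
    set N := max_val.toNat with hN
    have hNv : ((N : Nat) : Int) = max_val := Int.toNat_of_nonneg (by omega)
    have hQmem : ∀ p ∈ Q, 2 ≤ p ∧ p.toNat.Prime := fun p hp =>
      (altIsPrime_iff p).mp (mem_listPrimes a 2 p hp).2
    have hQprime : ∀ p ∈ Q, Prime p ∧ 0 < p := by
      intro p hp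
      have h := hQmem p hp
      refine ⟨?_, by omega⟩
      rw [Int.prime_iff_natAbs_prime]
      have hna : p.natAbs = p.toNat := by omega
      rw [hna]; exact h.2
    have hQpw : Q.Pairwise (· ≠ ·) := (listPrimes_pairwise a 2).imp ne_of_lt
    have hprodpos : 1 ≤ Q.prod := listPrimes_prod_pos a 2
    show (PySem.List.count
        (outerGo a (prime_list a) (PySem.List.pyRange 1 (max_val + 1)).length
          (PySem.List.pyRange 1 (max_val + 1)) 0) 0 : Int) =
      altLoopGo max_val (pvPrimeFuel a) 1 a 2
    rw [hPL, altLoopGo_eq max_val hm1 (pvPrimeFuel a) 1 a 2 le_rfl (by omega)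
        (by simpa using hfuelOK), one_mul]
    set L := PySem.List.pyRange 1 (max_val + 1) with hL
    have houter : outerGo a Q L.length L 0 =
        L.map (fun x => if innerGo a Q x a.toNat 0 = 1 then 0 else x) := by
      have h0 : (0 : Int) = ((0 : Nat) : Int) := rfl
      rw [h0, outerGo_eq a Q L.length L 0 (by omega)]
      simp
    have hiff : ∀ x : Int, innerGo a Q x a.toNat 0 = 1 ↔ Q.prod ∣ x := by
      intro x
      by_cases ha : 0 < a
      · have hlen : ((Q.length : Nat) : Int) = a := by
          rw [hQ, length_listPrimes a 2 (by omega)]; omega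
        have hlenN : Q.length = a.toNat := by omega
        have h0 : (0 : Int) = ((0 : Nat) : Int) := rfl
        rw [← hlenN, ← hlen, h0, innerGo_eq Q x Q.length 0 (by omega), List.drop_zero]
        rw [← dvd_prod_iff_forall x Q hQpw hQprime]
        by_cases hall : ∀ p ∈ Q, p ∣ x
        · rw [if_pos (by simp only [List.all_eq_true, decide_eq_true_eq,
              PySem.Int.mod_eq_zero_iff_dvd]; exact hall)]
          exact iff_of_true rfl hall
        · rw [if_neg (by simp only [List.all_eq_true, decide_eq_true_eq,
              PySem.Int.mod_eq_zero_iff_dvd]; exact hall)]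
          exact iff_of_false (by omega) hall
      · have hQnil : Q = [] := by
          rw [hQ, listPrimes, dif_pos (by omega), if_neg (by omega)]
        have hfz : a.toNat = 0 := by omega
        rw [hfz, hQnil]
        show (1 : Int) = 1 ↔ (List.prod [] ∣ x)
        simp
    have hmap : L.map (fun x => if innerGo a Q x a.toNat 0 = 1 then 0 else x) =
        L.map (fun x => if Q.prod ∣ x then 0 else x) :=
      List.map_congr_left (fun x _ => by simp only [hiff])
    rw [houter, hmap, PySem.List.count_eq]
    have hcm := count_multiples Q.prod hprodpos N
    rw [hNv] at hcm
    rw [hcm, hQ]
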